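-- pv_equiv track=rewrite | github.com/sipakhti/code-with-mosh-python | CS 112 Spring 2020/Functions.py | skip_sum
-- ===== SOURCE A (Python) =====
-- def skip_sum(num1, num2, N):
--     """Returns the sum of the integers between numl and num2 inclusive
--        but it skips every Nth number in this sequence.
--        N is always larger than 1 while num1 and num2 can be in any order
--     """
--
--     count = 0
--     total = 0
--     if num1 > num2:
--         num1, num2 = num2, num1
--
--     for i in range(num1, num2+1):
--         count += 1
--         # using another variable count as a counter so that Nth number can be skipped
--         if count % N != 0:
--             total += i
--         else:
--             pass
--
--     return total
-- ===== SOURCE B (Python) =====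
-- def skip_sum(num1, num2, N):
--     """Closed-form: total arithmetic range sum minus the arithmetic sum of the
--     skipped elements (every |N|-th from the low end), computed in O(1)."""
--     lo, hi = (num2, num1) if num1 > num2 else (num1, num2)
--     n = hi - lo + 1
--     total = (lo + hi) * n // 2
--     a = abs(N)
--     k = n // a                      # how many elements are skipped
--     skipped = k * (lo - 1) + a * k * (k + 1) // 2
--     return total - skipped
-- ===== Notes on version B (the rewrite author's own statement) =====
-- stated objective: faster
-- what changed: Replaces the O(num2-num1) counting loop by an O(1) closed form: the arithmetic range sum minus the arithmetic sum of the floor(n/|N|) skipped elements.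
import Mathlib
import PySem

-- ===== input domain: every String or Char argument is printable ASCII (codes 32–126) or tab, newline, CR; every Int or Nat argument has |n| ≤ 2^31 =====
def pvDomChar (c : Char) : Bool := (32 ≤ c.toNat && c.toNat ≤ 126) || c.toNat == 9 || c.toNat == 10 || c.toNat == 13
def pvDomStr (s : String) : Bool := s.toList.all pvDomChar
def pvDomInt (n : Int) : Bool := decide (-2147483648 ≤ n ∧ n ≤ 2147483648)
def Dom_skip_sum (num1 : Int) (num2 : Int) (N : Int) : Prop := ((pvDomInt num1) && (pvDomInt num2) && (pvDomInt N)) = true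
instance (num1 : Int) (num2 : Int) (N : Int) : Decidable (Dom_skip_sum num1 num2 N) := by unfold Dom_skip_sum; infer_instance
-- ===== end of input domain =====

-- B replaces A's element-by-element counting loop with an O(1) closed form
-- (range sum minus arithmetic sum of the skipped elements); return values agree for N ≠ 0.

-- ===== PORT A =====
-- loop body of A's for-loop: count += 1; if count % N != 0: total += i
def pvStep_skip_sum (N : Int) (st : Int × Int) (i : Int) : Int × Int :=
  if PySem.Int.mod (st.1 + 1) N ≠ 0 then (st.1 + 1, st.2 + i) else (st.1 + 1, st.2)

def skip_sum (num1 : Int) (num2 : Int) (N : Int) : Int :=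
  let p := if num1 > num2 then (num2, num1) else (num1, num2)
  let st := (PySem.List.pyRange p.1 (p.2 + 1) 1).foldl (pvStep_skip_sum N) (0, 0)
  st.2

-- ===== PORT B =====
def skip_sum_alt (num1 : Int) (num2 : Int) (N : Int) : Int :=
  let lo := min num1 num2
  let hi := max num1 num2
  let n := hi - lo + 1
  let total := PySem.Int.floordiv ((lo + hi) * n) 2
  let a := |N|
  let k := PySem.Int.floordiv n a
  let skipped := k * (lo - 1) + PySem.Int.floordiv (a * k * (k + 1)) 2
  total - skipped

-- ===== PRECONDITION & SPEC =====
-- Pre_ excludes only N = 0, where the Python A raises ZeroDivisionError (count % 0).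
def Pre_skip_sum (num1 : Int) (num2 : Int) (N : Int) : Prop := N ≠ 0
instance (num1 : Int) (num2 : Int) (N : Int) : Decidable (Pre_skip_sum num1 num2 N) := by unfold Pre_skip_sum; infer_instance
def pvWitness_skip_sum : Int × Int × Int := (3, 10, 2)

def Spec_skip_sum (num1 : Int) (num2 : Int) (N : Int) (out : Int) : Prop := out = skip_sum_alt num1 num2 N
instance (num1 : Int) (num2 : Int) (N : Int) (out : Int) : Decidable (Spec_skip_sum num1 num2 N out) := by unfold Spec_skip_sum; infer_instance

-- ===== CLAIM (what is proved, stated in full; the proofs are below) =====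
def Claim_equal_skip_sum : Prop := ∀ (num1 : Int) (num2 : Int) (N : Int), Dom_skip_sum num1 num2 N → Pre_skip_sum num1 num2 N → Spec_skip_sum num1 num2 N (skip_sum num1 num2 N)

-- ===== LEMMAS AND PROOFS =====

-- running value of A's loop total after the first n iterations (element lo+j has count j+1)
def pvG (lo N : Int) : Nat → Int
  | 0 => 0
  | n+1 => pvG lo N n + (if PySem.Int.mod ((n : Int) + 1) N ≠ 0 then lo + (n : Int) else 0)

theorem pv_fold_eq (lo N : Int) (n : Nat) :
    (PySem.List.pyRange lo (lo + (n : Int)) 1).foldl (pvStep_skip_sum N) (0, 0)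
      = ((n : Int), pvG lo N n) := by
  induction n with
  | zero => simp [PySem.List.pyRange_one_eq_nil (le_refl lo), pvG]
  | succ n ih =>
    have h : lo + ((n + 1 : Nat) : Int) = (lo + (n : Int)) + 1 := by push_cast; ring
    rw [h, PySem.List.pyRange_one_succ_right (by omega), List.foldl_append, ih]
    simp only [List.foldl, pvStep_skip_sum, pvG]
    split_ifs with hmod <;> simp

-- step lemma for the triangular range sum
theorem pv_Tstep (lo : Int) (n : Nat) :
    (2*lo + ((n : Int)+1) - 1) * ((n : Int)+1) / 2
      = (2*lo + (n : Int) - 1) * (n : Int) / 2 + (lo + (n : Int)) := by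
  have h : (2*lo + ((n : Int)+1) - 1) * ((n : Int)+1)
      = (2*lo + (n : Int) - 1) * (n : Int) + (lo + (n : Int)) * 2 := by ring
  rw [h, Int.add_mul_ediv_right _ _ (by norm_num)]

-- the loop total equals the closed form
theorem pv_g_closed (lo : Int) (N : Int) (hN : N ≠ 0) (n : Nat) :
    pvG lo N n = (2*lo + (n : Int) - 1) * (n : Int) / 2
      - (((n / N.natAbs : Nat) : Int) * (lo - 1)
          + ((N.natAbs * (n / N.natAbs) * (n / N.natAbs + 1) / 2 : Nat) : Int)) := by
  have ha : 0 < N.natAbs := Int.natAbs_pos.mpr hN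
  induction n with
  | zero => simp [pvG]
  | succ n ih =>
    have hcond : PySem.Int.mod ((n : Int) + 1) N = 0 ↔ N.natAbs ∣ (n + 1) := by
      rw [PySem.Int.mod_eq_zero_iff_dvd, ← Int.natAbs_dvd,
        show ((n : Int) + 1) = ((n + 1 : Nat) : Int) by push_cast; ring,
        Int.natCast_dvd_natCast]
    rw [pvG]
    by_cases hd : N.natAbs ∣ (n + 1)
    · -- skipped element: loop adds 0, closed form's k increases by 1
      rw [if_neg (not_not_intro (hcond.mpr hd)), add_zero, ih]
      have hk : (n + 1) / N.natAbs = n / N.natAbs + 1 := by rw [Nat.succ_div, if_pos hd]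
      set k := n / N.natAbs with hkdef
      have hn1 : n + 1 = N.natAbs * (k + 1) := by
        have h2 := Nat.div_mul_cancel hd
        rw [hk] at h2
        rw [← h2, Nat.mul_comm]
      obtain ⟨m, hm⟩ := Nat.even_mul_succ_self k
      have hskip1 : N.natAbs * k * (k+1) / 2 = N.natAbs * m := by
        rw [mul_assoc, hm, show N.natAbs * (m + m) = N.natAbs * m * 2 by ring]
        exact Nat.mul_div_cancel _ (by norm_num)
      have hskip2 : N.natAbs * ((n+1) / N.natAbs) * ((n+1) / N.natAbs + 1) / 2
          = N.natAbs * m + N.natAbs * (k + 1) := by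
        rw [hk]
        have h3 : N.natAbs * (k+1) * (k+1+1) = N.natAbs * (m + m) + (N.natAbs * (k+1)) * 2 := by
          rw [← hm]; ring
        rw [h3, show N.natAbs * (m + m) + N.natAbs * (k + 1) * 2
              = (N.natAbs * m + N.natAbs * (k + 1)) * 2 by ring]
        exact Nat.mul_div_cancel _ (by norm_num)
      rw [hskip1, hskip2, hk]
      have hcast : ((N.natAbs * (k + 1) : Nat) : Int) = (n : Int) + 1 := by exact_mod_cast hn1.symm
      simp only [Nat.cast_add, Nat.cast_one]
      rw [pv_Tstep]
      linarith [hcast]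
    · -- kept element: loop adds lo + n, closed form's k unchanged
      rw [if_pos (fun h0 => hd (hcond.mp h0)), ih]
      have hk : (n + 1) / N.natAbs = n / N.natAbs := by rw [Nat.succ_div, if_neg hd, Nat.add_zero]
      rw [hk]
      simp only [Nat.cast_add, Nat.cast_one]
      rw [pv_Tstep]
      linarith

-- both ports, reoriented to the sorted pair (lo, hi), agree
theorem pv_main (lo hi N : Int) (hle : lo ≤ hi) (hN : N ≠ 0) :
    ((PySem.List.pyRange lo (hi + 1) 1).foldl (pvStep_skip_sum N) (0, 0)).2
      = PySem.Int.floordiv ((lo + hi) * (hi - lo + 1)) 2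
        - (PySem.Int.floordiv (hi - lo + 1) |N| * (lo - 1)
            + PySem.Int.floordiv (|N| * PySem.Int.floordiv (hi - lo + 1) |N|
                * (PySem.Int.floordiv (hi - lo + 1) |N| + 1)) 2) := by
  have ha : 0 < N.natAbs := Int.natAbs_pos.mpr hN
  set n : Nat := (hi - lo + 1).toNat with hndef
  have hn : (n : Int) = hi - lo + 1 := by omega
  have hrange : hi + 1 = lo + (n : Int) := by omega
  rw [hrange, pv_fold_eq, pv_g_closed lo N hN n]
  have habs : |N| = (N.natAbs : Int) := Int.abs_eq_natAbs N
  set k := n / N.natAbs with hkdef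
  have hk : PySem.Int.floordiv (hi - lo + 1) |N| = (k : Int) := by
    rw [← hn, habs]
    exact_mod_cast PySem.Int.floordiv_natCast n N.natAbs
  have htot : PySem.Int.floordiv ((lo + hi) * (hi - lo + 1)) 2
      = (2*lo + (n : Int) - 1) * (n : Int) / 2 := by
    rw [PySem.Int.floordiv_eq_ediv_of_pos (by norm_num)]
    congr 1
    have hhi : hi = lo + (n : Int) - 1 := by omega
    rw [hhi]; ring
  have hskip : PySem.Int.floordiv (|N| * (k : Int) * ((k : Int) + 1)) 2
      = ((N.natAbs * k * (k + 1) / 2 : Nat) : Int) := by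
    rw [PySem.Int.floordiv_eq_ediv_of_pos (by norm_num), habs]
    have h1 : (N.natAbs : Int) * (k : Int) * ((k : Int) + 1) = ((N.natAbs * k * (k + 1) : Nat) : Int) := by
      push_cast; ring
    rw [h1]
    rw [show ((2:Int) = ((2:Nat):Int)) from rfl, ← Int.natCast_div]
  rw [hk, htot, hskip]

-- ===== VERDICT (by name: the statement is the Claim_ definition above) =====
theorem skip_sum_spec : Claim_equal_skip_sum := by
  intro num1 num2 N _ hN
  unfold Spec_skip_sum skip_sum skip_sum_alt
  by_cases h : num1 > num2
  · simp only [if_pos h]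
    have h1 : min num1 num2 = num2 := min_eq_right (le_of_lt h)
    have h2 : max num1 num2 = num1 := max_eq_left (le_of_lt h)
    rw [h1, h2]
    exact pv_main num2 num1 N (le_of_lt h) hN
  · simp only [if_neg h]
    have hle : num1 ≤ num2 := not_lt.mp h
    rw [min_eq_left hle, max_eq_right hle]
    exact pv_main num1 num2 N hle hN
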